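-- pv_equiv track=rewrite | github.com/swjungle4a-algorithm/algorithm_study | Jinho/level1/3진법.py | solution
-- ===== SOURCE A (Python) =====
-- def solution(n):
--     third = []
--     answer = 0
--     while n:
--         b = n%3
--         third = [b] + third
--         n = n//3
--     for i in range(len(third)):
--         answer += third[i] * 3 ** i
--     return answer
-- ===== SOURCE B (Python) =====
-- def _rev(n):
--     # n != 0; returns (reversed-ternary value of n, 3 ** number_of_ternary_digits(n))
--     b = n % 3
--     m = n // 3
--     if not m:
--         return b, 3
--     v, p = _rev(m)
--     return b * p + v, p * 3
--
--
-- def solution(n):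
--     if not n:
--         return 0
--     return _rev(n)[0]
-- ===== Notes on version B (the rewrite author's own statement) =====
-- stated objective: alternative
-- what changed: B replaces A's explicit digit list and weighted power-of-3 summation loop with a structural recursion on n that returns a (reversed value, power) pair: each step places the least-significant digit at the current most-significant position via b*p+v, so no list is ever built.
import Mathlib
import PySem

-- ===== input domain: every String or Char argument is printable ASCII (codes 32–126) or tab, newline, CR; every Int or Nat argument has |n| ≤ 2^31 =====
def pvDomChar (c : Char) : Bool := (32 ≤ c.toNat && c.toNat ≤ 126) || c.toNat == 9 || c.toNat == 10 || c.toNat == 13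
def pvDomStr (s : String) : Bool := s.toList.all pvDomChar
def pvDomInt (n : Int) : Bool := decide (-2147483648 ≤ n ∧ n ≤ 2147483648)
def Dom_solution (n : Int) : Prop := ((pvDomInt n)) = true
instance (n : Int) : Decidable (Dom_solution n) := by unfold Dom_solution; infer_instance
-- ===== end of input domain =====

-- B replaces A's digit list and weighted-sum pass with one structural recursion
-- returning a (reversed value, power) pair (alternative decomposition, no list).

-- ===== PORT A =====
-- A's while loop: prepend n%3 to `third`, n //= 3, while n ≠ 0.  For n < 0 Python's
-- loop never terminates (n//3 stays at -1), so such n are excluded by Pre_solution;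
-- the port's guard `n ≤ 0` coincides with `n == 0` there and makes the function total.
def solutionLoop (n : Int) (third : List Int) : List Int :=
  if n ≤ 0 then third
  else solutionLoop (PySem.Int.floordiv n 3) (PySem.Int.mod n 3 :: third)
termination_by n.toNat
decreasing_by
  have h3 : PySem.Int.floordiv n 3 = n / 3 := PySem.Int.floordiv_eq_ediv_of_pos (by omega)
  rw [h3]; omega

def solution (n : Int) : Int :=
  let third := solutionLoop n []
  -- for i in range(len(third)): answer += third[i] * 3 ** i   (i ≥ 0, so 3 ** i = 3 ^ i.toNat)
  (PySem.List.pyRange 0 (third.length : Int) 1).foldl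
    (fun answer i => answer + PySem.List.pyGetD third i 0 * 3 ^ i.toNat) 0

-- ===== PORT B =====
-- _rev(n): b, m = n % 3, n // 3; if not m: return (b, 3); v, p = _rev(m); return (b*p+v, p*3).
-- Python recurses forever for n < 0 (m stays -1); on the n ≥ 1 inputs Pre_solution admits,
-- m = n//3 is ≥ 0, so the totalising guard `m ≤ 0` coincides with Python's `not m`.
def solutionAltRev (n : Int) : Int × Int :=
  let b := PySem.Int.mod n 3
  let m := PySem.Int.floordiv n 3
  if m ≤ 0 then (b, 3)
  else
    let vp := solutionAltRev m
    (b * vp.2 + vp.1, vp.2 * 3)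
termination_by n.toNat
decreasing_by
  have h3 : PySem.Int.floordiv n 3 = n / 3 := PySem.Int.floordiv_eq_ediv_of_pos (by positivity)
  rw [h3]; omega

def solution_alt (n : Int) : Int :=
  if n = 0 then 0 else (solutionAltRev n).1

-- ===== PRECONDITION & SPEC =====
-- Pre_ excludes exactly n < 0, where Python's A never returns (its `while n` loop runs forever
-- because n//3 stabilises at -1).
def Pre_solution (n : Int) : Prop := 0 ≤ n
instance (n : Int) : Decidable (Pre_solution n) := by unfold Pre_solution; infer_instance
def pvWitness_solution : Int := 5

def Spec_solution (n : Int) (out : Int) : Prop := out = solution_alt n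
instance (n : Int) (out : Int) : Decidable (Spec_solution n out) := by unfold Spec_solution; infer_instance

-- ===== CLAIM (what is proved, stated in full; the proofs are below) =====
def Claim_equal_solution : Prop := ∀ (n : Int), Dom_solution n → Pre_solution n → Spec_solution n (solution n)

-- ===== LEMMAS AND PROOFS =====

-- pvEv xs = Σ_i xs[i] * 3^i
def pvEv : List Int → Int
  | [] => 0
  | x :: xs => x + 3 * pvEv xs

theorem pvEv_append_singleton (xs : List Int) (x : Int) :
    pvEv (xs ++ [x]) = pvEv xs + x * 3 ^ xs.length := by
  induction xs with
  | nil => simp [pvEv]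
  | cons y ys ih => simp [pvEv, ih]; ring

-- A's for-loop computes pvEv of the digit list.
theorem solution_foldl_eq_ev (xs : List Int) (c : Int) :
    (PySem.List.pyRange 0 (xs.length : Int) 1).foldl
      (fun answer i => answer + PySem.List.pyGetD xs i 0 * 3 ^ i.toNat) c = c + pvEv xs := by
  induction xs using List.reverseRecOn generalizing c with
  | nil => simp [PySem.List.pyRange_one_eq_nil, pvEv]
  | append_singleton ys x ih =>
    have hlen : ((ys ++ [x]).length : Int) = (ys.length : Int) + 1 := by simp
    rw [hlen, PySem.List.pyRange_one_succ_right (by positivity), List.foldl_append]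
    have hcong :
        (PySem.List.pyRange 0 (ys.length : Int) 1).foldl
          (fun answer i => answer + PySem.List.pyGetD (ys ++ [x]) i 0 * 3 ^ i.toNat) c
        = (PySem.List.pyRange 0 (ys.length : Int) 1).foldl
          (fun answer i => answer + PySem.List.pyGetD ys i 0 * 3 ^ i.toNat) c := by
      refine PySem.List.foldl_congr_mem _ _ _ _ (fun acc i hi => ?_)
      have hi' := (PySem.List.mem_pyRange_one).1 hi
      have h1 : PySem.List.pyGetD (ys ++ [x]) i 0 = ys[i.toNat] := by
        rw [PySem.List.pyGetD_eq_getElem _ _ hi'.1 (by simp; omega)]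
        exact List.getElem_append_left (by omega)
      have h2 : PySem.List.pyGetD ys i 0 = ys[i.toNat] :=
        PySem.List.pyGetD_eq_getElem _ _ hi'.1 hi'.2
      rw [h1, h2]
    rw [hcong, ih]
    have hx : PySem.List.pyGetD (ys ++ [x]) ((ys.length : Int)) 0 = x := by
      rw [PySem.List.pyGetD_eq_getElem _ _ (by simp) (by simp)]
      simp
    rw [List.foldl_cons, List.foldl_nil, hx, pvEv_append_singleton]
    simp; ring

theorem solutionLoop_append_fuel (k : Nat) :
    ∀ (n : Int), n.toNat ≤ k → ∀ third, solutionLoop n third = solutionLoop n [] ++ third := by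
  induction k with
  | zero =>
    intro n hn third
    have h : n ≤ 0 := by omega
    have hnil : solutionLoop n [] = [] := by rw [solutionLoop]; simp [h]
    rw [solutionLoop, hnil]; simp [h]
  | succ k ih =>
    intro n hn third
    by_cases h : n ≤ 0
    · have hnil : solutionLoop n [] = [] := by rw [solutionLoop]; simp [h]
      rw [solutionLoop, hnil]; simp [h]
    · have hd : PySem.Int.floordiv n 3 = n / 3 := PySem.Int.floordiv_eq_ediv_of_pos (by omega)
      have hk : (PySem.Int.floordiv n 3).toNat ≤ k := by rw [hd]; omega
      rw [solutionLoop]; rw [if_neg h]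
      rw [ih _ hk]
      conv_rhs => rw [solutionLoop]; rw [if_neg h]
      rw [ih _ hk [PySem.Int.mod n 3]]
      simp

theorem solutionLoop_append (n : Int) (third : List Int) :
    solutionLoop n third = solutionLoop n [] ++ third :=
  solutionLoop_append_fuel n.toNat n le_rfl third

theorem solution_eq_ev (n : Int) : solution n = pvEv (solutionLoop n []) := by
  rw [solution]
  simpa using solution_foldl_eq_ev (solutionLoop n []) 0

-- B's recursion returns (pvEv of A's digit list, 3 ^ its length), for n ≥ 1.
theorem solutionAltRev_eq_fuel (k : Nat) :
    ∀ (n : Int), n.toNat ≤ k → 1 ≤ n →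
      solutionAltRev n = (pvEv (solutionLoop n []), 3 ^ (solutionLoop n []).length) := by
  induction k with
  | zero => intro n hn h1; omega
  | succ k ih =>
    intro n hn h1
    have hd : PySem.Int.floordiv n 3 = n / 3 := PySem.Int.floordiv_eq_ediv_of_pos (by omega)
    have hL : solutionLoop n [] =
        solutionLoop (PySem.Int.floordiv n 3) [] ++ [PySem.Int.mod n 3] := by
      rw [solutionLoop]; rw [if_neg (by omega)]
      exact solutionLoop_append _ _
    by_cases hm : PySem.Int.floordiv n 3 ≤ 0
    · have hm0 : PySem.Int.floordiv n 3 = 0 := by rw [hd] at hm ⊢; omega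
      have hnil : solutionLoop (PySem.Int.floordiv n 3) [] = [] := by
        rw [hm0, solutionLoop]; simp
      rw [solutionAltRev]
      simp only [hm, if_pos]
      rw [hL, hnil]
      simp [pvEv]
    · have hk : (PySem.Int.floordiv n 3).toNat ≤ k := by rw [hd]; omega
      have hm1 : 1 ≤ PySem.Int.floordiv n 3 := by omega
      rw [solutionAltRev]
      rw [if_neg hm]
      rw [ih _ hk hm1, hL, pvEv_append_singleton]
      simp [pow_succ]; ring_nf

-- ===== VERDICT (by name: the statement is the Claim_ definition above) =====
theorem solution_spec : Claim_equal_solution := by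
  intro n _ hpre
  unfold Spec_solution solution_alt
  by_cases h0 : n = 0
  · subst h0
    simp [solution_eq_ev, solutionLoop, pvEv]
  · rw [if_neg h0, solution_eq_ev,
        solutionAltRev_eq_fuel n.toNat n le_rfl (by unfold Pre_solution at hpre; omega)]
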